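-- pv_equiv track=rewrite | github.com/JanssenBrm/google_foobar | challenge3a/solution.py | solution
-- ===== SOURCE A (Python) =====
-- def solution(l):
--     divs = [0] * len(l)
--     count = 0
--
--     for i in range(0, len(l)):
--         for j in range(0, i):
--             if l[i] % l[j] == 0:
--                 divs[i] = divs[i] + 1
--                 count = count + divs[j]
--     return count
-- ===== SOURCE B (Python) =====
-- def solution(l):
--     # middle-element decomposition: for each j, multiply the number of
--     # left divisors of l[j] by the number of right multiples of l[j]
--     n = len(l)
--     total = 0
--     for j in range(n):
--         left = sum(1 for h in range(n) if h < j and l[j] % l[h] == 0)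
--         right = sum(1 for i in range(n) if i > j and l[i] % l[j] == 0)
--         total += left * right
--     return total
-- ===== Notes on version B (the rewrite author's own statement) =====
-- stated objective: alternative
-- what changed: Replaces A's running divs[] DP (count accumulated from intermediate divisor counts while scanning pairs) by an independent per-middle-element product: for each j, (number of earlier divisors of l[j]) * (number of later multiples of l[j]), summed.
import Mathlib
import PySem

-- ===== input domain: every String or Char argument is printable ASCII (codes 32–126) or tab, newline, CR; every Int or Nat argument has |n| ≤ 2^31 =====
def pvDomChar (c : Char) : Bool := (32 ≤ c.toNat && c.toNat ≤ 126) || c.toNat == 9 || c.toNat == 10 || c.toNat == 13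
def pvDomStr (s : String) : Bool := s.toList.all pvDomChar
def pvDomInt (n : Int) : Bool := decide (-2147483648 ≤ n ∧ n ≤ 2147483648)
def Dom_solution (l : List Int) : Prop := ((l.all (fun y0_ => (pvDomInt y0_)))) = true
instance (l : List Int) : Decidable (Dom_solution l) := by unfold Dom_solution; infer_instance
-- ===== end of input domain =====

-- B replaces A's running divs[] DP by an independent left*right product per middle element; same O(n^2) cost, different decomposition.

-- ===== PORT A =====
-- literal transliteration of A: divs array + count accumulated over the pair loop
def solInner (l : List Int) (i : Nat) (st2 : List Int × Int) (j : Nat) : List Int × Int :=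
  if PySem.Int.mod (l.getD i 0) (l.getD j 0) = 0 then
    (st2.1.set i (st2.1.getD i 0 + 1), st2.2 + st2.1.getD j 0)
  else st2

def solution (l : List Int) : Int :=
  ((List.range l.length).foldl
    (fun (st : List Int × Int) (i : Nat) => (List.range i).foldl (solInner l i) st)
    (List.replicate l.length (0 : Int), (0 : Int))).2

-- ===== PORT B =====
def solution_alt (l : List Int) : Int :=
  (List.range l.length).foldl
    (fun (total : Int) (j : Nat) =>
      let left : Int :=
        ((List.range l.length).filter
          (fun h => h < j ∧ PySem.Int.mod (l.getD j 0) (l.getD h 0) = 0)).length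
      let right : Int :=
        ((List.range l.length).filter
          (fun i => j < i ∧ PySem.Int.mod (l.getD i 0) (l.getD j 0) = 0)).length
      total + left * right) 0

-- ===== PRECONDITION & SPEC =====
-- Pre_ excludes exactly the inputs where Python A raises ZeroDivisionError:
-- a zero anywhere except the last position is used as a divisor.
def Pre_solution (l : List Int) : Prop := (0 : Int) ∉ l.dropLast
instance (l : List Int) : Decidable (Pre_solution l) := by unfold Pre_solution; infer_instance
def pvWitness_solution : List Int := [1, 2, 4]

def Spec_solution (l : List Int) (out : Int) : Prop := out = solution_alt l
instance (l : List Int) (out : Int) : Decidable (Spec_solution l out) := by unfold Spec_solution; infer_instance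

-- ===== CLAIM (what is proved, stated in full; the proofs are below) =====
def Claim_equal_solution : Prop := ∀ (l : List Int), Dom_solution l → Pre_solution l → Spec_solution l (solution l)

-- ===== LEMMAS AND PROOFS =====

-- left-divisor count of the middle element j (the value divs[j] ends with in A)
def Lc (l : List Int) (j : Nat) : Nat :=
  ((List.range j).filter (fun h => PySem.Int.mod (l.getD j 0) (l.getD h 0) = 0)).length

-- right-multiple count of the middle element j
def Rc (l : List Int) (j : Nat) : Nat :=
  ((List.range l.length).filter
    (fun i => j < i ∧ PySem.Int.mod (l.getD i 0) (l.getD j 0) = 0)).length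

-- divs after m outer iterations
def Dv (l : List Int) (m : Nat) : List Int :=
  (List.range l.length).map (fun k => if k < m then (Lc l k : Int) else 0)

-- count after m outer iterations
def Cv (l : List Int) (m : Nat) : Int :=
  ∑ i ∈ Finset.range m, ∑ j ∈ Finset.range i,
    (if PySem.Int.mod (l.getD i 0) (l.getD j 0) = 0 then (Lc l j : Int) else 0)

lemma foldl_add_map (f : Nat → Int) : ∀ (xs : List Nat) (a : Int),
    xs.foldl (fun acc x => acc + f x) a = a + (xs.map f).sum := by
  intro xs
  induction xs with
  | nil => simp
  | cons x xs ih => intro a; simp [List.foldl_cons, ih, add_assoc]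

lemma sum_range_list (f : Nat → Int) (n : Nat) :
    ∑ j ∈ Finset.range n, f j = ((List.range n).map f).sum := by
  induction n with
  | zero => simp
  | succ n ih => simp [Finset.sum_range_succ, List.range_succ, ih]

lemma map_filter_sum {α : Type} (p : α → Bool) (f : α → Int) : ∀ (xs : List α),
    ((xs.filter p).map f).sum = (xs.map (fun x => if p x then f x else 0)).sum := by
  intro xs
  induction xs with
  | nil => simp
  | cons x xs ih =>
    by_cases h : p x <;> simp [h, ih]

lemma length_filter_sum {α : Type} (p : α → Bool) : ∀ (xs : List α),
    (((xs.filter p).length : Nat) : Int) = (xs.map (fun x => if p x then (1 : Int) else 0)).sum := by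
  intro xs
  induction xs with
  | nil => simp
  | cons x xs ih =>
    by_cases h : p x <;> simp [h, ih, add_comm]

lemma filter_range_lt (P : Nat → Bool) (j k : Nat) :
    (List.range (j + k)).filter (fun h => decide (h < j) && P h)
      = (List.range j).filter P := by
  rw [List.range_add, List.filter_append]
  have h1 : (List.range j).filter (fun h => decide (h < j) && P h) = (List.range j).filter P := by
    apply List.filter_congr
    intro x hx
    simp [List.mem_range.mp hx]
  have h2 : (((List.range k).map (j + ·)).filter (fun h => decide (h < j) && P h)) = [] := by
    rw [List.filter_eq_nil_iff]
    intro a ha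
    rcases List.mem_map.mp ha with ⟨x, _, rfl⟩
    simp
  rw [h1, h2, List.append_nil]

-- inner-loop invariant: count gains Σ divs[j] over matching j<i; divs[i] gains the match count
lemma inner_spec (l : List Int) (i : Nat) : ∀ (js : List Nat) (divs : List Int) (count : Int),
    (∀ j ∈ js, j < i) → i < divs.length →
    js.foldl (solInner l i) (divs, count)
      = (divs.set i (divs.getD i 0
            + ((js.filter (fun j => PySem.Int.mod (l.getD i 0) (l.getD j 0) = 0)).length : Int)),
         count + ((js.filter (fun j => PySem.Int.mod (l.getD i 0) (l.getD j 0) = 0)).map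
            (fun j => divs.getD j 0)).sum) := by
  intro js
  induction js with
  | nil =>
    intro divs count _ hi
    rw [List.foldl_nil, List.filter_nil, List.map_nil]
    simp only [List.length_nil, Nat.cast_zero, add_zero, List.sum_nil]
    rw [List.getD_eq_getElem divs 0 hi, List.set_getElem_self]
  | cons j js ih =>
    intro divs count hlt hi
    have hj : j < i := hlt j (List.mem_cons_self)
    by_cases h : PySem.Int.mod (l.getD i 0) (l.getD j 0) = 0
    · rw [List.foldl_cons]
      have step : solInner l i (divs, count) j
          = (divs.set i (divs.getD i 0 + 1), count + divs.getD j 0) := by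
        unfold solInner; rw [if_pos h]
      rw [step, ih _ _ (fun x hx => hlt x (List.mem_cons_of_mem _ hx)) (by simpa using hi),
        List.filter_cons, if_pos (by simpa using h)]
      have hgi : (divs.set i (divs.getD i 0 + 1)).getD i 0 = divs.getD i 0 + 1 := by
        simp [List.getD, hi]
      have hmap : ((js.filter (fun x => PySem.Int.mod (l.getD i 0) (l.getD x 0) = 0)).map
            (fun x => (divs.set i (divs.getD i 0 + 1)).getD x 0))
          = ((js.filter (fun x => PySem.Int.mod (l.getD i 0) (l.getD x 0) = 0)).map
            (fun x => divs.getD x 0)) := by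
        apply List.map_congr_left
        intro x hx
        have hxi : x ≠ i := by
          have := hlt x (List.mem_cons_of_mem _ (List.mem_of_mem_filter hx))
          omega
        simp [List.getD, List.getElem?_set_ne (Ne.symm hxi)]
      simp only [Prod.mk.injEq]
      refine ⟨?_, ?_⟩
      · rw [List.set_set, hgi, List.length_cons]
        congr 1
        push_cast
        ring
      · rw [hmap, List.map_cons, List.sum_cons]
        ring
    · rw [List.foldl_cons]
      have step : solInner l i (divs, count) j = (divs, count) := by
        unfold solInner; rw [if_neg h]
      rw [step, ih _ _ (fun x hx => hlt x (List.mem_cons_of_mem _ hx)) hi,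
        List.filter_cons, if_neg (by simpa using h)]

lemma Dv_getD (l : List Int) (m j : Nat) (hj : j < l.length) :
    (Dv l m).getD j 0 = if j < m then (Lc l j : Int) else 0 := by
  simp [Dv, List.getD, hj]

lemma Dv_length (l : List Int) (m : Nat) : (Dv l m).length = l.length := by
  simp [Dv]

lemma outer_spec (l : List Int) : ∀ (m : Nat), m ≤ l.length →
    (List.range m).foldl (fun (st : List Int × Int) (i : Nat) => (List.range i).foldl (solInner l i) st)
      (List.replicate l.length (0 : Int), (0 : Int)) = (Dv l m, Cv l m) := by
  intro m
  induction m with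
  | zero =>
    intro _
    simp [Dv, Cv, List.map_const']
  | succ m ih =>
    intro hm
    have hmn : m < l.length := by omega
    rw [List.range_succ, List.foldl_append, ih (by omega), List.foldl_cons, List.foldl_nil]
    rw [inner_spec l m (List.range m) (Dv l m) (Cv l m)
      (fun j hj => List.mem_range.mp hj) (by rw [Dv_length]; exact hmn)]
    rw [Dv_getD l m m hmn, if_neg (by omega), zero_add]
    simp only [Prod.mk.injEq]
    refine ⟨?_, ?_⟩
    · -- divs component
      apply List.ext_getElem
      · simp [Dv_length]
      · intro k h1 h2
        have hk : k < l.length := by simpa [Dv_length] using h2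
        by_cases hkm : k = m
        · subst hkm
          rw [List.getElem_set_self (by simpa [Dv_length] using hmn)]
          simp [Dv, Lc]
        · rw [List.getElem_set_ne (by omega)]
          simp only [Dv, List.getElem_map, List.getElem_range]
          by_cases hklt : k < m
          · rw [if_pos hklt, if_pos (by omega)]
          · rw [if_neg hklt, if_neg (by omega)]
    · -- count component
      have hCv : Cv l (m + 1) = Cv l m + ∑ j ∈ Finset.range m,
          (if PySem.Int.mod (l.getD m 0) (l.getD j 0) = 0 then (Lc l j : Int) else 0) := by
        rw [Cv, Finset.sum_range_succ, ← Cv]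
      rw [hCv]
      congr 1
      have hmap : ((List.range m).filter (fun j => PySem.Int.mod (l.getD m 0) (l.getD j 0) = 0)).map
          (fun j => (Dv l m).getD j 0)
          = ((List.range m).filter (fun j => PySem.Int.mod (l.getD m 0) (l.getD j 0) = 0)).map
          (fun j => (Lc l j : Int)) := by
        apply List.map_congr_left
        intro x hx
        have hxm : x < m := List.mem_range.mp (List.mem_of_mem_filter hx)
        rw [Dv_getD l m x (by omega), if_pos hxm]
      rw [hmap, map_filter_sum, sum_range_list]
      simp

lemma solution_eq_Cv (l : List Int) : solution l = Cv l l.length := by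
  rw [solution, outer_spec l l.length (le_refl _)]

lemma solution_alt_eq (l : List Int) :
    solution_alt l = ∑ j ∈ Finset.range l.length, (Lc l j : Int) * (Rc l j : Int) := by
  rw [solution_alt]
  simp only []
  rw [foldl_add_map (fun j =>
      (((List.range l.length).filter
          (fun h => h < j ∧ PySem.Int.mod (l.getD j 0) (l.getD h 0) = 0)).length : Int)
      * (((List.range l.length).filter
          (fun i => j < i ∧ PySem.Int.mod (l.getD i 0) (l.getD j 0) = 0)).length : Int))]
  rw [zero_add, ← sum_range_list]
  apply Finset.sum_congr rfl
  intro j hj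
  have hjn : j ≤ l.length := le_of_lt (Finset.mem_range.mp hj)
  congr 1
  -- left count over range n with h<j equals Lc over range j
  have : (List.range l.length).filter
      (fun h => h < j ∧ PySem.Int.mod (l.getD j 0) (l.getD h 0) = 0)
      = (List.range j).filter (fun h => PySem.Int.mod (l.getD j 0) (l.getD h 0) = 0) := by
    have hsplit : l.length = j + (l.length - j) := by omega
    rw [hsplit]
    have := filter_range_lt (fun h => decide (PySem.Int.mod (l.getD j 0) (l.getD h 0) = 0)) j (l.length - j)
    simpa [Bool.decide_and] using this
  rw [Lc, this]

lemma sum_ite_lt (f : Nat → Int) (i n : Nat) (h : i ≤ n) :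
    ∑ j ∈ Finset.range n, (if j < i then f j else 0) = ∑ j ∈ Finset.range i, f j := by
  rw [← Finset.sum_subset (s₁ := Finset.range i) (s₂ := Finset.range n)
    (fun x hx => Finset.mem_range.mpr (lt_of_lt_of_le (Finset.mem_range.mp hx) h))
    (fun x _ hx => by
      rw [if_neg]
      intro hc
      exact hx (Finset.mem_range.mpr hc))]
  exact Finset.sum_congr rfl (fun j hj => if_pos (Finset.mem_range.mp hj))

lemma sum_swap_eq (l : List Int) : Cv l l.length
    = ∑ j ∈ Finset.range l.length, (Lc l j : Int) * (Rc l j : Int) := by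
  rw [Cv]
  have step1 : ∀ i ∈ Finset.range l.length,
      (∑ j ∈ Finset.range i,
        (if PySem.Int.mod (l.getD i 0) (l.getD j 0) = 0 then (Lc l j : Int) else 0))
      = ∑ j ∈ Finset.range l.length,
        (if j < i ∧ PySem.Int.mod (l.getD i 0) (l.getD j 0) = 0 then (Lc l j : Int) else 0) := by
    intro i hi
    have h2 : ∀ j ∈ Finset.range l.length,
        (if j < i ∧ PySem.Int.mod (l.getD i 0) (l.getD j 0) = 0 then (Lc l j : Int) else 0)
        = if j < i then (if PySem.Int.mod (l.getD i 0) (l.getD j 0) = 0 then (Lc l j : Int) else 0) else 0 := by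
      intro j _
      by_cases hji : j < i
      · by_cases hd : PySem.Int.mod (l.getD i 0) (l.getD j 0) = 0 <;> simp [hji]
      · simp [hji]
    rw [Finset.sum_congr rfl h2,
      sum_ite_lt (fun j => if PySem.Int.mod (l.getD i 0) (l.getD j 0) = 0 then (Lc l j : Int) else 0)
        i l.length (le_of_lt (Finset.mem_range.mp hi))]
  rw [Finset.sum_congr rfl step1, Finset.sum_comm]
  apply Finset.sum_congr rfl
  intro j _
  have split : ∀ i : Nat,
      (if j < i ∧ PySem.Int.mod (l.getD i 0) (l.getD j 0) = 0 then (Lc l j : Int) else 0)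
      = (Lc l j : Int) * (if j < i ∧ PySem.Int.mod (l.getD i 0) (l.getD j 0) = 0 then (1:Int) else 0) := by
    intro i
    by_cases h : j < i ∧ PySem.Int.mod (l.getD i 0) (l.getD j 0) = 0 <;> simp [h]
  rw [Finset.sum_congr rfl (fun i _ => split i), ← Finset.mul_sum]
  congr 1
  rw [Rc, length_filter_sum, ← sum_range_list]
  apply Finset.sum_congr rfl
  intro i _
  by_cases h : j < i ∧ PySem.Int.mod (l.getD i 0) (l.getD j 0) = 0 <;> simp [h]

-- ===== VERDICT (by name: the statement is the Claim_ definition above) =====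
theorem solution_spec : Claim_equal_solution := by
  intro l _ _
  unfold Spec_solution
  rw [solution_eq_Cv, solution_alt_eq, sum_swap_eq]
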